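-- pv_equiv track=rewrite | github.com/bensmus/box-grouping-optimization | warehouse_organize.py | compute_group_cost
-- ===== SOURCE A (Python) =====
-- def compute_group_cost(cells, group):
--     # `cells` and `group` are both collections of tuples.
--     cell_rows = [row for (row, _) in cells]
--     cells_height = max(cell_rows) - min(cell_rows) + 1
--     group_cost = 0
--     # Iterate through a bounding box of cells,
--     # simulating the access of group (from top to bottom).
--     group_columns = [column for (_, column) in group]
--     for column in group_columns:
--         column_subcosts = []
--         cell_above_flag = False
--         cells_above = 0 # Important for non-rectangular cell stacks.
--         for row in range(cells_height):
--             iter_cell = (row, column)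
--             if iter_cell in group:
--                 if not cell_above_flag: # Consider whether cell above was in group.
--                     column_subcosts.append(cells_above)
--                 cell_above_flag = True
--             else:
--                 cell_above_flag = False
--             if iter_cell in cells:
--                 cells_above += 1
--         column_cost = sum(column_subcosts)
--         group_cost += column_cost
--     return group_cost
-- ===== SOURCE B (Python) =====
-- def compute_group_cost(cells, group):
--     # Set-based rewrite: instead of scanning the full bounding-box height for
--     # every group occurrence, enumerate run-start rows straight from the set of
--     # group cells and memoize the cost per column.
--     cell_rows = [row for (row, _) in cells]
--     height = max(cell_rows) - min(cell_rows) + 1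
--     group_set = set(group)
--     cells_set = set(cells)
--     cache = {}
--     total = 0
--     for (_, c) in group:
--         if c not in cache:
--             cost = 0
--             for (r, cc) in group_set:
--                 if cc == c and 0 <= r < height and (r == 0 or (r - 1, c) not in group_set):
--                     cost += sum(1 for (rr, c2) in cells_set if c2 == c and 0 <= rr < r)
--             cache[c] = cost
--         total += cache[c]
--     return total
-- ===== Notes on version B (the rewrite author's own statement) =====
-- stated objective: faster
-- what changed: A rescans the whole bounding-box height once per group occurrence with linear 'in' tests on lists; B builds sets of group and cell tuples once, enumerates run-start rows directly from the distinct group cells, and memoizes the per-column cost in a dict keyed by column.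
import Mathlib
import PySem

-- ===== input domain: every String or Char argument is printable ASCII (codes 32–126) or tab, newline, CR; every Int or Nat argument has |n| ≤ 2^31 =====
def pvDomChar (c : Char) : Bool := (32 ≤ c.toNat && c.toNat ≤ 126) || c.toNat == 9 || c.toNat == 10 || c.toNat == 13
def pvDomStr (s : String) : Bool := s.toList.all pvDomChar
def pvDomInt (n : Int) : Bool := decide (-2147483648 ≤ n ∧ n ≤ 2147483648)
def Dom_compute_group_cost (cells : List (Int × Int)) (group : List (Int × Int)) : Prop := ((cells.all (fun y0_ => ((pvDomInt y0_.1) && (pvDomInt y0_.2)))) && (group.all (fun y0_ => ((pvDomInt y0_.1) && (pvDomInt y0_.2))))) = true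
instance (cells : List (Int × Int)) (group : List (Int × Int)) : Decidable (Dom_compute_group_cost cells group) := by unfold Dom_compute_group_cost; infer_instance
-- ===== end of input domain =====

-- B replaces A's per-occurrence scan of the whole bounding-box height by a set-based
-- enumeration of run-start rows with a per-column memo; equal return value on Pre_.

-- ===== PORT A =====
def compute_group_cost (cells : List (Int × Int)) (group : List (Int × Int)) : Int :=
  let cell_rows := cells.map (fun p => p.1)
  match PySem.List.max? cell_rows (fun x => x), PySem.List.min? cell_rows (fun x => x) with
  | some mx, some mn =>
    let cells_height := mx - mn + 1
    let group_columns := group.map (fun p => p.2)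
    group_columns.foldl (fun group_cost column =>
      let st := (PySem.List.pyRange 0 cells_height 1).foldl
        (fun (st : List Int × Bool × Int) row =>
          let iter_cell := (row, column)
          let sf : List Int × Bool :=
            if iter_cell ∈ group then
              ((if !st.2.1 then st.1 ++ [st.2.2] else st.1), true)
            else (st.1, false)
          let ca := if iter_cell ∈ cells then st.2.2 + 1 else st.2.2
          (sf.1, sf.2, ca)) ([], false, 0)
      group_cost + st.1.sum) 0
  | _, _ => 0   -- unreachable under Pre_ (max/min of the empty list raise in Python)

-- ===== PORT B =====
def compute_group_cost_alt (cells : List (Int × Int)) (group : List (Int × Int)) : Int :=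
  let cell_rows := cells.map (fun p => p.1)
  -- max/min of the empty list raise in Python: none is unreachable under Pre_
  (PySem.List.max? cell_rows (fun x => x)).elim 0 fun mx =>
  (PySem.List.min? cell_rows (fun x => x)).elim 0 fun mn =>
    let height := mx - mn + 1
    let group_set : PySem.Set (Int × Int) := PySem.Set.ofList group
    let cells_set : PySem.Set (Int × Int) := PySem.Set.ofList cells
    -- value of the sums below does not depend on the (unmodelled) Python set iteration order
    let st := group.foldl (fun (st : PySem.Dict Int Int × Int) gc =>
      let c := gc.2
      let cache :=
        if st.1.contains c then st.1
        else
          let cost := group_set.foldl (fun cost p =>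
            if p.2 = c ∧ 0 ≤ p.1 ∧ p.1 < height ∧ (p.1 = 0 ∨ (p.1 - 1, c) ∉ group_set) then
              cost + (cells_set.foldl (fun k q => if q.2 = c ∧ 0 ≤ q.1 ∧ q.1 < p.1 then k + 1 else k) 0)
            else cost) 0
          st.1.insert c cost
      (cache, st.2 + cache.getD c 0)) (PySem.Dict.empty, 0)
    st.2

-- ===== PRECONDITION & SPEC =====
-- Pre_: Python A raises ValueError (max of an empty sequence) on cells = []; B raises there too.
def Pre_compute_group_cost (cells : List (Int × Int)) (group : List (Int × Int)) : Prop := cells ≠ []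
instance (cells : List (Int × Int)) (group : List (Int × Int)) : Decidable (Pre_compute_group_cost cells group) := by unfold Pre_compute_group_cost; infer_instance
def pvWitness_compute_group_cost : (List (Int × Int)) × (List (Int × Int)) := ([(0, 0), (1, 0)], [(0, 0), (1, 0)])

def Spec_compute_group_cost (cells : List (Int × Int)) (group : List (Int × Int)) (out : Int) : Prop := out = compute_group_cost_alt cells group
instance (cells : List (Int × Int)) (group : List (Int × Int)) (out : Int) : Decidable (Spec_compute_group_cost cells group out) := by unfold Spec_compute_group_cost; infer_instance

-- ===== CLAIM (what is proved, stated in full; the proofs are below) =====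
def Claim_equal_compute_group_cost : Prop := ∀ (cells : List (Int × Int)) (group : List (Int × Int)), Dom_compute_group_cost cells group → Pre_compute_group_cost cells group → Spec_compute_group_cost cells group (compute_group_cost cells group)

-- ===== LEMMAS AND PROOFS =====

-- number of bounding-box rows r' < r whose cell (r', c) exists
def wCnt (cells : List (Int × Int)) (c r : Int) : Int :=
  ((PySem.List.pyRange 0 r 1).map (fun r' => if (r', c) ∈ cells then (1 : Int) else 0)).sum

-- A appends the running count exactly at run-start rows
def condA (group : List (Int × Int)) (c r : Int) : Bool :=
  decide ((r, c) ∈ group) && !(decide (0 < r ∧ (r - 1, c) ∈ group))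

-- common characterisation of the per-column cost
def colA (cells group : List (Int × Int)) (h c : Int) : Int :=
  (((PySem.List.pyRange 0 h 1).filter (condA group c)).map (wCnt cells c)).sum

-- B's per-column cost, exactly the expression Port B inserts into the cache
def colB (cells group : List (Int × Int)) (h c : Int) : Int :=
  (PySem.Set.ofList group).foldl (fun cost p =>
    if p.2 = c ∧ 0 ≤ p.1 ∧ p.1 < h ∧ (p.1 = 0 ∨ (p.1 - 1, c) ∉ PySem.Set.ofList group) then
      cost + ((PySem.Set.ofList cells).foldl (fun k q => if q.2 = c ∧ 0 ≤ q.1 ∧ q.1 < p.1 then k + 1 else k) 0)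
    else cost) 0

lemma wCnt_succ (cells : List (Int × Int)) (c : Int) (n : Nat) :
    wCnt cells c ((n : Int) + 1) = wCnt cells c n + (if ((n : Int), c) ∈ cells then 1 else 0) := by
  unfold wCnt
  rw [PySem.List.pyRange_one_succ_right (by positivity)]
  simp

lemma A_loop (cells group : List (Int × Int)) (c : Int) (n : Nat) :
    (PySem.List.pyRange 0 (n : Int) 1).foldl
      (fun (st : List Int × Bool × Int) row =>
        let iter_cell := (row, c)
        let sf : List Int × Bool :=
          if iter_cell ∈ group then
            ((if !st.2.1 then st.1 ++ [st.2.2] else st.1), true)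
          else (st.1, false)
        let ca := if iter_cell ∈ cells then st.2.2 + 1 else st.2.2
        (sf.1, sf.2, ca)) ([], false, 0)
    = (((PySem.List.pyRange 0 (n : Int) 1).filter (condA group c)).map (wCnt cells c),
       decide (0 < (n : Int) ∧ ((n : Int) - 1, c) ∈ group),
       wCnt cells c n) := by
  induction n with
  | zero => simp [PySem.List.pyRange_one_eq_nil, wCnt]
  | succ n ih =>
    push_cast
    rw [PySem.List.pyRange_one_succ_right (by positivity), List.foldl_append, ih]
    have h1 : ((n : Int)) + 1 - 1 = (n : Int) := by ring
    have h2 : (0 : Int) < (n : Int) + 1 := by positivity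
    simp only [List.foldl_cons, List.foldl_nil, List.filter_append, List.map_append,
      List.filter_cons, List.filter_nil, wCnt_succ, h1]
    by_cases hg : ((n : Int), c) ∈ group <;> by_cases hcl : ((n : Int), c) ∈ cells <;>
      by_cases hprev : (0 < (n : Int) ∧ ((n : Int) - 1, c) ∈ group) <;>
      simp [condA, hg, hcl, hprev, h2] <;>
      first
      | rfl
      | omega
      | (constructor <;> omega)
      | tauto
      | (split_ifs <;> simp)

-- sum of an indicator-weighted map over a Nodup list of pairs = weighted sum over the row range
lemma filter_or_sum (w : Int → Int) (Q pr : Int → Bool) (a : Int) :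
    ∀ (l : List Int), l.Nodup → pr a = false →
      ((l.filter (fun r => (decide (r = a) || pr r) && Q r)).map w).sum
      = ((l.filter (fun r => pr r && Q r)).map w).sum + (if a ∈ l ∧ Q a = true then w a else 0) := by
  intro l
  induction l with
  | nil => simp
  | cons x l ih =>
    intro hnd hpa
    obtain ⟨hx, hl⟩ := List.nodup_cons.mp hnd
    by_cases hxa : x = a
    · subst hxa
      have htail : (l.filter (fun r => (decide (r = x) || pr r) && Q r)) = l.filter (fun r => pr r && Q r) := by
        apply List.filter_congr
        intro r hr
        have hne : r ≠ x := fun h => hx (h ▸ hr)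
        simp [hne]
      have hxl : x ∉ l := hx
      by_cases hq : Q x = true <;>
        simp [List.filter_cons, hpa, htail, hq, hxl] <;> ring
    · have hmem : (a ∈ x :: l) = (a ∈ l) := by
        simp [List.mem_cons, Ne.symm hxa]
      by_cases hpx : (pr x && Q x) = true <;>
        simp [List.filter_cons, hxa, hpx, hmem, ih hl hpa] <;> ring

lemma set_sum (c h : Int) (w : Int → Int) (Q : Int → Bool) :
    ∀ (s : List (Int × Int)), s.Nodup →
      (s.map (fun p => if p.2 = c ∧ 0 ≤ p.1 ∧ p.1 < h ∧ Q p.1 = true then w p.1 else 0)).sum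
      = (((PySem.List.pyRange 0 h 1).filter (fun r => decide ((r, c) ∈ s) && Q r)).map w).sum := by
  intro s
  induction s with
  | nil => simp
  | cons p s ih =>
    intro hnd
    obtain ⟨hp, hs⟩ := List.nodup_cons.mp hnd
    by_cases hp2 : p.2 = c
    · have hpc : (p.1, c) = p := by
        rw [← hp2]
      have hfc : ∀ r ∈ PySem.List.pyRange 0 h 1,
          (decide ((r, c) ∈ p :: s) && Q r) = ((decide (r = p.1) || decide ((r, c) ∈ s)) && Q r) := by
        intro r _
        have : (r, c) ∈ p :: s ↔ r = p.1 ∨ (r, c) ∈ s := by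
          constructor
          · intro hm
            rcases List.mem_cons.mp hm with hm | hm
            · left; rw [← hpc] at hm; exact congrArg Prod.fst hm
            · right; exact hm
          · rintro (hm | hm)
            · rw [← hpc, hm]; exact List.mem_cons_self
            · exact List.mem_cons_of_mem _ hm
        simp [this]
      rw [List.filter_congr hfc,
        filter_or_sum w Q (fun r => decide ((r, c) ∈ s)) p.1 _ (PySem.List.nodup_pyRange_one 0 h)
          (by simp only [decide_eq_false_iff_not]; rw [hpc]; exact hp),
        ← ih hs]
      simp [hp2, PySem.List.mem_pyRange_one]
      by_cases h1 : 0 ≤ p.1 <;> by_cases h2 : p.1 < h <;> by_cases h3 : Q p.1 = true <;>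
        simp [h1, h2, h3] <;> ring
    · have hfc : ∀ r ∈ PySem.List.pyRange 0 h 1,
          (decide ((r, c) ∈ p :: s) && Q r) = (decide ((r, c) ∈ s) && Q r) := by
        intro r _
        have : (r, c) ∈ p :: s ↔ (r, c) ∈ s := by
          constructor
          · intro hm
            rcases List.mem_cons.mp hm with hm | hm
            · exact absurd (congrArg Prod.snd hm).symm hp2
            · exact hm
          · exact List.mem_cons_of_mem _
        simp [this]
      rw [List.filter_congr hfc, ← ih hs]
      simp [hp2]

lemma sum_filter_map (w : Int → Int) (p : Int → Bool) (l : List Int) :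
    ((l.filter p).map w).sum = (l.map (fun r => if p r = true then w r else 0)).sum := by
  induction l with
  | nil => simp
  | cons x l ih => by_cases hx : p x = true <;> simp [hx, ih]

lemma colB_eq_colA (cells group : List (Int × Int)) (h c : Int) :
    colB cells group h c = colA cells group h c := by
  have hinner : ∀ p1 : Int,
      (PySem.Set.ofList cells).foldl (fun k (q : Int × Int) => if q.2 = c ∧ 0 ≤ q.1 ∧ q.1 < p1 then k + 1 else k) 0
      = wCnt cells c p1 := by
    intro p1
    rw [PySem.List.foldl_congr_mem' _ _
        (fun k (q : Int × Int) => k + if q.2 = c ∧ 0 ≤ q.1 ∧ q.1 < p1 ∧ (fun _ : Int => true) q.1 = true then (1 : Int) else 0) 0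
        (by intro q _ k; split_ifs <;> simp_all),
      PySem.List.foldl_add, zero_add,
      set_sum c p1 (fun _ => (1 : Int)) (fun _ => true) (PySem.Set.ofList cells) (PySem.Set.nodup_ofList cells),
      sum_filter_map]
    unfold wCnt
    apply congrArg
    apply List.map_congr_left
    intro r _
    simp [PySem.Set.mem_ofList]
  unfold colB
  rw [PySem.List.foldl_congr_mem' _ _
      (fun cost (p : Int × Int) => cost +
        (if p.2 = c ∧ 0 ≤ p.1 ∧ p.1 < h ∧ (fun r => decide (r = 0 ∨ (r - 1, c) ∉ PySem.Set.ofList group)) p.1 = true then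
          wCnt cells c p.1 else 0)) 0
      (by
        intro p _ cost
        rw [hinner p.1]
        split_ifs <;> simp_all),
    PySem.List.foldl_add, zero_add,
    set_sum c h (wCnt cells c) (fun r => decide (r = 0 ∨ (r - 1, c) ∉ PySem.Set.ofList group))
      (PySem.Set.ofList group) (PySem.Set.nodup_ofList group)]
  unfold colA
  apply congrArg
  apply congrArg
  apply List.filter_congr
  intro r hr
  have hr0 : 0 ≤ r := (PySem.List.mem_pyRange_one.mp hr).1
  by_cases hm : (r, c) ∈ group <;> by_cases hp : (r - 1, c) ∈ group <;> by_cases hz : r = 0 <;>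
    simp [condA, PySem.Set.mem_ofList, hm, hp, hz] <;> omega

lemma cache_loop (cells group : List (Int × Int)) (h : Int) :
    ∀ (l : List (Int × Int)) (cache : PySem.Dict Int Int) (total : Int),
      (∀ k, cache.contains k = true → cache.getD k 0 = colB cells group h k) →
      (l.foldl (fun (st : PySem.Dict Int Int × Int) gc =>
        ((if st.1.contains gc.2 then st.1 else st.1.insert gc.2 (colB cells group h gc.2)),
         st.2 + (if st.1.contains gc.2 then st.1 else st.1.insert gc.2 (colB cells group h gc.2)).getD gc.2 0))
        (cache, total)).2
      = total + (l.map (fun g => colB cells group h g.2)).sum := by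
  intro l
  induction l with
  | nil => intro cache total _; simp
  | cons g l ih =>
    intro cache total hinv
    simp only [List.foldl_cons, List.map_cons, List.sum_cons]
    by_cases hc : cache.contains g.2 = true
    · simp only [hc, if_true]
      rw [ih cache (total + cache.getD g.2 0) hinv, hinv g.2 hc]
      ring
    · simp only [hc, if_false, Bool.false_eq_true]
      have hv : (cache.insert g.2 (colB cells group h g.2)).getD g.2 0 = colB cells group h g.2 :=
        PySem.Dict.getD_insert_self cache g.2 _ 0
      have hinv' : ∀ k, (cache.insert g.2 (colB cells group h g.2)).contains k = true →
          (cache.insert g.2 (colB cells group h g.2)).getD k 0 = colB cells group h k := by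
        intro k hk
        rw [PySem.Dict.getD_insert]
        by_cases hkc : k = g.2
        · simp [hkc]
        · simp only [hkc, if_false]
          apply hinv
          rcases (Bool.or_eq_true _ _).mp ((PySem.Dict.contains_insert cache g.2 k _) ▸ hk) with h1 | h1
          · exact absurd (by simpa using h1) hkc
          · exact h1
      rw [ih _ _ hinv', hv]
      ring

-- ===== VERDICT (by name: the statement is the Claim_ definition above) =====
theorem compute_group_cost_spec : Claim_equal_compute_group_cost := by
  intro cells group _ hPre
  unfold Spec_compute_group_cost compute_group_cost compute_group_cost_alt
  have hne : cells.map (fun p => p.1) ≠ [] := by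
    simpa using hPre
  cases h1 : PySem.List.max? (cells.map (fun p => p.1)) (fun x => x) with
  | none => exact absurd ((PySem.List.max?_eq_none_iff _ _).mp h1) hne
  | some mx =>
  cases h2 : PySem.List.min? (cells.map (fun p => p.1)) (fun x => x) with
  | none => exact absurd ((PySem.List.min?_eq_none_iff _ _).mp h2) hne
  | some mn =>
  have hmn : mn ≤ mx := PySem.List.max?_isMax h1 mn (PySem.List.min?_mem h2)
  obtain ⟨n, hh⟩ : ∃ n : Nat, mx - mn + 1 = (n : Int) := ⟨(mx - mn + 1).toNat, by omega⟩
  simp only [h1, h2, Option.elim_some, hh]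
  -- B side: the memoising fold is the sum of per-column costs
  have hB : (group.foldl (fun (st : PySem.Dict Int Int × Int) gc =>
        ((if st.1.contains gc.2 then st.1 else st.1.insert gc.2 (colB cells group (n : Int) gc.2)),
         st.2 + (if st.1.contains gc.2 then st.1 else st.1.insert gc.2 (colB cells group (n : Int) gc.2)).getD gc.2 0))
        (PySem.Dict.empty, 0)).2
      = 0 + (group.map (fun g => colB cells group (n : Int) g.2)).sum :=
    cache_loop cells group (n : Int) group PySem.Dict.empty 0
      (by intro k hk; rw [PySem.Dict.contains_empty] at hk; cases hk)
  unfold colB at hB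
  rw [hB, PySem.List.foldl_add, List.map_map]
  simp only [zero_add]
  apply congrArg
  apply List.map_congr_left
  intro p _
  have h3 := congrArg (fun t : List Int × Bool × Int => t.1.sum) (A_loop cells group p.2 n)
  show _ = colB cells group ((n : Nat) : Int) p.2
  rw [colB_eq_colA]
  exact h3
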